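-- pv_equiv track=rewrite | github.com/GeanovuMedeea/University-Tech-Project | Semester 1/Algebra/Algebra Project/main.py | create_binary
-- ===== SOURCE A (Python) =====
-- import math
--
-- def create_binary(x):
--     num=x**2
--     n = int(math.log(num,2))
--     x = [0,1]
--
--     for i in range(1,int(n)+1):
--         for j in range(0,2**i):
--             x.append(1 + x[j])
--             x[j]= 0 + x[j]
--
--     return(x[0:num])
-- ===== SOURCE B (Python) =====
-- import math
--
-- def create_binary(x):
--     num = x ** 2
--     n = int(math.log(num, 2))
--     pc = [0]
--     for i in range(1, 2 ** (n + 1)):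
--         pc.append(pc[i // 2] + (i % 2))
--     return pc[0:num]
-- ===== Notes on version B (the rewrite author's own statement) =====
-- stated objective: simpler
-- what changed: Replaces the nested doubling recurrence (repeatedly appending a +1 copy of the growing list) with a single flat DP pass pc[i] = pc[i//2] + (i%2) over a preallocated table of the same length 2**(n+1), then the same slice.
import Mathlib
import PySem

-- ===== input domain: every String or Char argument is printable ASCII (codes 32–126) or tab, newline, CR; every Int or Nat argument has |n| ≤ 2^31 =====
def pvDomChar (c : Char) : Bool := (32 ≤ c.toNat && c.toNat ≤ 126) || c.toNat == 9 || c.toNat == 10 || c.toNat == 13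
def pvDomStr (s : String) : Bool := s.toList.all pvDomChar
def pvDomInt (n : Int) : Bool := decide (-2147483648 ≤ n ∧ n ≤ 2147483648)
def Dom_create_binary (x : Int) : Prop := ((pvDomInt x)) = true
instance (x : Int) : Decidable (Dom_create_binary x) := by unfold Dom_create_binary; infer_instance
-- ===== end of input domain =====

-- B replaces A's nested doubling recurrence (append a +1 copy of the growing list, level by level)
-- with a single flat DP pass pc[i] = pc[i//2] + (i%2) over a preallocated table of the same length; objective: simpler.


-- ===== PORT A =====
-- int(math.log(num, 2)) for num = x² with 1 ≤ |x| ≤ 2^31 is exactly floor(log2 num) = num.bit_length() - 1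
-- (checked against Python's float log over the whole domain); ported as bitLength num - 1.
-- The Python line 'x[j] = 0 + x[j]' is ported literally as the (identity) set it performs.
def create_binary (x : Int) : List Int :=
  let num : Int := x ^ 2
  let n : Nat := PySem.Int.bitLength num - 1
  let xs : List Int := [0, 1]
  let xs := (PySem.List.pyRange 1 ((n : Int) + 1) 1).foldl (fun xs i =>
      (PySem.List.pyRange 0 ((2 : Int) ^ i.toNat) 1).foldl (fun xs j =>
        let v := PySem.List.pyGetD xs j 0
        (xs ++ [1 + v]).set j.toNat (0 + v)) xs) xs
  PySem.List.slice xs (some 0) (some num)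

-- ===== PORT B =====
def create_binary_alt (x : Int) : List Int :=
  let num : Int := x ^ 2
  let n : Nat := PySem.Int.bitLength num - 1
  let pc := (PySem.List.pyRange 1 ((2 ^ (n + 1) : Nat) : Int) 1).foldl (fun pc i =>
      pc ++ [PySem.List.pyGetD pc (PySem.Int.floordiv i 2) 0 + PySem.Int.mod i 2]) [0]
  PySem.List.slice pc (some 0) (some num)

-- ===== PRECONDITION & SPEC =====
-- Pre_ excludes only x = 0, where Python's math.log(0, 2) raises ValueError.
def Pre_create_binary (x : Int) : Prop := x ≠ 0
instance (x : Int) : Decidable (Pre_create_binary x) := by unfold Pre_create_binary; infer_instance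
def pvWitness_create_binary : Int := 3

def Spec_create_binary (x : Int) (out : List Int) : Prop := out = create_binary_alt x
instance (x : Int) (out : List Int) : Decidable (Spec_create_binary x out) := by unfold Spec_create_binary; infer_instance

-- ===== CLAIM (what is proved, stated in full; the proofs are below) =====
def Claim_equal_create_binary : Prop := ∀ (x : Int), Dom_create_binary x → Pre_create_binary x → Spec_create_binary x (create_binary x)

-- ===== LEMMAS AND PROOFS =====

-- popcount table of length 2^(n+1), the common value of both loops
def pcI (k : Nat) : Int := (PySem.Int.bitCount (k : Int) : Int)
def tblpref (m : Nat) : List Int := (List.range m).map pcI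
def tbl (n : Nat) : List Int := tblpref (2 ^ (n + 1))

lemma pcI_zero : pcI 0 = 0 := by decide

lemma pcI_half (k : Nat) (h : 0 < k) : pcI k = pcI (k / 2) + (k % 2 : Nat) := by
  unfold pcI
  rw [PySem.Int.bitCount_natCast h]
  push_cast
  ring

lemma pcI_top (m : Nat) : ∀ k, k < 2 ^ m → pcI (2 ^ m + k) = pcI k + 1 := by
  induction m with
  | zero =>
    intro k hk
    have : k = 0 := by omega
    subst this
    decide
  | succ m ih =>
    intro k hk
    have h1 : 0 < 2 ^ (m + 1) + k := by positivity
    rw [pcI_half _ h1]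
    have hdiv : (2 ^ (m + 1) + k) / 2 = 2 ^ m + k / 2 := by
      omega
    have hmod : (2 ^ (m + 1) + k) % 2 = k % 2 := by
      omega
    rw [hdiv, hmod, ih (k / 2) (by omega)]
    by_cases hk0 : 0 < k
    · rw [pcI_half k hk0]; ring
    · have : k = 0 := by omega
      subst this
      simp [pcI_zero]

lemma innerA (xs : List Int) :
    ∀ m : Nat, m ≤ xs.length →
      (PySem.List.pyRange 0 (m : Int) 1).foldl (fun xs j =>
          let v := PySem.List.pyGetD xs j 0
          (xs ++ [1 + v]).set j.toNat (0 + v)) xs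
        = xs ++ (xs.take m).map (fun v => 1 + v) := by
  intro m
  induction m with
  | zero => intro _; simp [PySem.List.pyRange_one_eq_nil]
  | succ m ih =>
    intro hm
    have hm' : m ≤ xs.length := by omega
    have : ((m : Int) + 1) = ((m + 1 : Nat) : Int) := by push_cast; ring
    rw [← this, PySem.List.pyRange_one_succ_right (by omega), List.foldl_append, ih hm']
    simp only [List.foldl_cons, List.foldl_nil]
    have hidx : m < xs.length := by omega
    have hv : PySem.List.pyGetD (xs ++ (xs.take m).map (fun v => 1 + v)) (m : Int) 0 = xs[m] := by
      rw [PySem.List.pyGetD_natCast]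
      rw [List.getD_eq_getElem?_getD, List.getElem?_append_left (by omega)]
      simp [List.getElem?_eq_getElem hidx]
    simp only [hv, Int.toNat_natCast, zero_add]
    have hset : ((xs ++ (xs.take m).map (fun v => 1 + v)) ++ [1 + xs[m]]).set m xs[m]
        = (xs ++ (xs.take m).map (fun v => 1 + v)) ++ [1 + xs[m]] := by
      apply List.ext_getElem
      · simp
      · intro i h1 h2
        by_cases hi : i = m
        · subst hi
          rw [List.getElem_set_self (by simpa using h2)]
          rw [List.getElem_append_left (by simp; omega), List.getElem_append_left hidx]
        · rw [List.getElem_set_ne (by omega)]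
    rw [hset]
    have htake : xs.take (m + 1) = xs.take m ++ [xs[m]] := by
      rw [List.take_add_one]
      simp [List.getElem?_eq_getElem hidx]
    rw [htake, List.map_append, List.append_assoc]
    simp

lemma outerA (n : Nat) :
    (PySem.List.pyRange 1 ((n : Int) + 1) 1).foldl (fun xs i =>
        (PySem.List.pyRange 0 ((2 : Int) ^ i.toNat) 1).foldl (fun xs j =>
          let v := PySem.List.pyGetD xs j 0
          (xs ++ [1 + v]).set j.toNat (0 + v)) xs) [0, 1]
      = tbl n := by
  induction n with
  | zero =>
    simp [PySem.List.pyRange_one_eq_nil]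
    decide
  | succ n ih =>
    have : ((n + 1 : Nat) : Int) + 1 = (((n : Nat) : Int) + 1) + 1 := by push_cast; ring
    rw [this, PySem.List.pyRange_one_succ_right (by omega), List.foldl_append, ih]
    simp only [List.foldl_cons, List.foldl_nil]
    have htn : ((n : Int) + 1).toNat = n + 1 := by omega
    rw [htn]
    have hpow : ((2 : Int) ^ (n + 1)) = ((2 ^ (n + 1) : Nat) : Int) := by push_cast; ring
    have hlen : (tbl n).length = 2 ^ (n + 1) := by simp [tbl, tblpref]
    rw [hpow, innerA (tbl n) (2 ^ (n + 1)) (by omega)]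
    rw [← hlen, List.take_length]
    -- tbl (n+1) = tbl n ++ (tbl n).map (1 + ·)
    unfold tbl tblpref
    have hsplit : 2 ^ (n + 1 + 1) = 2 ^ (n + 1) + 2 ^ (n + 1) := by ring
    rw [hsplit, List.range_add, List.map_append, List.map_map, List.map_map]
    congr 1
    apply List.map_congr_left
    intro k hk
    simp only [Function.comp_apply]
    have hk' : k < 2 ^ (n + 1) := by simpa using hk
    have h2 := pcI_top (n + 1) k hk'
    omega

lemma tblpref_succ (m : Nat) : tblpref (m + 1) = tblpref m ++ [pcI m] := by
  simp [tblpref, List.range_succ]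

lemma innerB :
    ∀ m : Nat, 1 ≤ m →
      (PySem.List.pyRange 1 (m : Int) 1).foldl (fun pc i =>
          pc ++ [PySem.List.pyGetD pc (PySem.Int.floordiv i 2) 0 + PySem.Int.mod i 2]) [0]
      = tblpref m := by
  intro m
  induction m with
  | zero => omega
  | succ m ih =>
    intro _
    by_cases hm1 : m = 0
    · subst hm1
      simp [PySem.List.pyRange_one_eq_nil, tblpref]
      decide
    · have hm : 1 ≤ m := by omega
      have : ((m + 1 : Nat) : Int) = ((m : Nat) : Int) + 1 := by push_cast; ring
      rw [this, PySem.List.pyRange_one_succ_right (by exact_mod_cast hm), List.foldl_append,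
        ih hm]
      simp only [List.foldl_cons, List.foldl_nil]
      have hdiv : PySem.Int.floordiv (m : Int) 2 = ((m / 2 : Nat) : Int) :=
        PySem.Int.floordiv_natCast m 2
      have hmod : PySem.Int.mod (m : Int) 2 = ((m % 2 : Nat) : Int) :=
        PySem.Int.mod_natCast m 2
      have hget : PySem.List.pyGetD (tblpref m) ((m / 2 : Nat) : Int) 0 = pcI (m / 2) := by
        rw [PySem.List.pyGetD_natCast]
        simp [tblpref, List.getD_eq_getElem?_getD, List.getElem?_map,
          List.getElem?_range (by omega : m / 2 < m)]
      rw [hdiv, hmod, hget, tblpref_succ, (pcI_half m hm).symm]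

lemma outerB (n : Nat) :
    (PySem.List.pyRange 1 ((2 ^ (n + 1) : Nat) : Int) 1).foldl (fun pc i =>
        pc ++ [PySem.List.pyGetD pc (PySem.Int.floordiv i 2) 0 + PySem.Int.mod i 2]) [0]
      = tbl n := by
  rw [innerB (2 ^ (n + 1)) Nat.one_le_two_pow]
  rfl

-- ===== VERDICT (by name: the statement is the Claim_ definition above) =====
theorem create_binary_spec : Claim_equal_create_binary := by
  intro x _ _
  unfold Spec_create_binary
  simp only [create_binary, create_binary_alt]
  rw [outerA, outerB]
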